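-- pv_equiv track=rewrite | github.com/Senticor-ai/project | backend/tests/test_openapi_header_parameters.py | _parameter_ref_id
-- ===== SOURCE A (Python) =====
-- def _parameter_ref_id(header_name: str) -> str:
--     token_chars: list[str] = []
--     for char in header_name:
--         if char.isalnum():
--             token_chars.append(char.lower())
--             continue
--         if token_chars and token_chars[-1] != "_":
--             token_chars.append("_")
--     token = "".join(token_chars).strip("_")
--     if not token:
--         token = "header"
--     return f"{token}_header"
-- ===== SOURCE B (Python) =====
-- def _parameter_ref_id(header_name: str) -> str:
--     cleaned = "".join(c if c.isalnum() else " " for c in header_name)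
--     token = "_".join(cleaned.lower().split())
--     if not token:
--         token = "header"
--     return f"{token}_header"
-- ===== Notes on version B (the rewrite author's own statement) =====
-- stated objective: idiomatic
-- what changed: B replaces A's single char loop with conditional separator insertion and edge-underscore stripping by a staged string pipeline: map every non-alnum char to a space, lowercase, whitespace-split() into words, and join them with underscores.
import Mathlib
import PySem

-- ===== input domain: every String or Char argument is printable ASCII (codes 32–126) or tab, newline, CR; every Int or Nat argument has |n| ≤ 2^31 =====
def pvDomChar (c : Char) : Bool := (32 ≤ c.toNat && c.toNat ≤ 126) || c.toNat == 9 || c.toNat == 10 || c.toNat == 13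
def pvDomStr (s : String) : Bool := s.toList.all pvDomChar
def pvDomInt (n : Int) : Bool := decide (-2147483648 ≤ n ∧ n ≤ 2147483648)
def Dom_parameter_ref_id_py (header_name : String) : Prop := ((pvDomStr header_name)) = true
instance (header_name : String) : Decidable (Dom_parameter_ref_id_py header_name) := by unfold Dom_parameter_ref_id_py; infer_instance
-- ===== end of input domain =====

-- B builds the id by staged string pipeline — mask every non-alnum char to a space, lowercase,
-- whitespace-split into words, join with underscores — instead of A's single char loop inserting separators then stripping edge underscores (idiomatic decomposition, same cost).


-- ===== PORT A =====
-- loop body of A: append the lowered alnum char; else append an underscore unless empty or already ending in one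
def pvAStep (acc : List Char) (c : Char) : List Char :=
  if PySem.Chars.isalnum c then acc ++ [PySem.Chars.lowerChar c]
  else if acc ≠ [] ∧ acc.getLast? ≠ some '_' then acc ++ ['_'] else acc

def parameter_ref_id_py (header_name : String) : String :=
  let token_chars := header_name.toList.foldl pvAStep []
  let token := PySem.Chars.stripChars token_chars ['_']
  let token := if token = [] then "header".toList else token
  String.ofList (token ++ "_header".toList)

-- ===== PORT B =====
def parameter_ref_id_py_alt (header_name : String) : String :=
  -- cleaned = "".join(c if c.isalnum() else " " for c in header_name)
  let cleaned := header_name.toList.map (fun c => if PySem.Chars.isalnum c then c else ' ')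
  -- token = "_".join(cleaned.lower().split())
  let token := PySem.Chars.join ['_'] (PySem.Chars.split₀ (PySem.Chars.lower cleaned))
  let token := if token = [] then "header".toList else token
  String.ofList (token ++ "_header".toList)

-- ===== PRECONDITION & SPEC =====
def Spec_parameter_ref_id_py (header_name : String) (out : String) : Prop := out = parameter_ref_id_py_alt header_name
instance (header_name : String) (out : String) : Decidable (Spec_parameter_ref_id_py header_name out) := by unfold Spec_parameter_ref_id_py; infer_instance

-- ===== CLAIM (what is proved, stated in full; the proofs are below) =====
def Claim_equal_parameter_ref_id_py : Prop := ∀ (header_name : String), Dom_parameter_ref_id_py header_name → Spec_parameter_ref_id_py header_name (parameter_ref_id_py header_name)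

-- ===== LEMMAS AND PROOFS =====

-- recursive form of the underscore join, convenient for induction
def pvJoin : List (List Char) → List Char
  | [] => []
  | [w] => w
  | w :: ws => w ++ '_' :: pvJoin ws

lemma pvJoin_eq_join (ws : List (List Char)) : PySem.Chars.join ['_'] ws = pvJoin ws := by
  induction ws with
  | nil => rfl
  | cons w ws ih =>
    cases ws with
    | nil => simp [PySem.Chars.join, List.intercalate, List.intersperse, pvJoin]
    | cons v vs =>
      simp only [PySem.Chars.join, List.intercalate, List.intersperse, List.flatten] at *
      simp [pvJoin, ← ih]

lemma pvJoin_concat (ws : List (List Char)) (w : List Char) (h : ws ≠ []) :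
    pvJoin (ws ++ [w]) = pvJoin ws ++ '_' :: w := by
  induction ws with
  | nil => exact absurd rfl h
  | cons x xs ih =>
    cases xs with
    | nil => rfl
    | cons v vs =>
      simp only [List.cons_append, pvJoin]
      rw [show pvJoin (v :: (vs ++ [w])) = pvJoin (v :: vs) ++ '_' :: w from by
            simpa using ih (by simp)]
      simp

lemma pvJoin_ne_nil (ws : List (List Char)) (w : List Char) (hw : w ≠ []) :
    pvJoin (ws ++ [w]) ≠ [] := by
  cases ws with
  | nil => simpa [pvJoin]
  | cons x xs =>
    rw [pvJoin_concat _ _ (by simp)]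
    simp

lemma pvJoin_getLast? (ws : List (List Char)) (w : List Char) (hw : w ≠ []) :
    (pvJoin (ws ++ [w])).getLast? = w.getLast? := by
  cases ws with
  | nil => simp [pvJoin]
  | cons x xs =>
    rw [pvJoin_concat _ _ (by simp)]
    rw [show pvJoin (x :: xs) ++ '_' :: w = (pvJoin (x :: xs) ++ ['_']) ++ w by simp]
    exact List.getLast?_append_of_ne_nil _ hw

lemma pvJoin_head? (w : List Char) (ws : List (List Char)) (hw : w ≠ []) :
    (pvJoin (w :: ws)).head? = w.head? := by
  cases ws with
  | nil => rfl
  | cons v vs =>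
    simp only [pvJoin]
    cases w with
    | nil => exact absurd rfl hw
    | cons a l => simp

-- a good word: nonempty and free of underscores
def pvGood (w : List Char) : Prop := w ≠ [] ∧ ∀ c ∈ w, c ≠ '_'

lemma pvJoin_head_ne (ws : List (List Char)) (hws : ∀ w ∈ ws, pvGood w) (hne : ws ≠ [])
    (a : Char) (ha : (pvJoin ws).head? = some a) : a ≠ '_' := by
  cases ws with
  | nil => exact absurd rfl hne
  | cons w rest =>
    have hg := hws w (by simp)
    rw [pvJoin_head? _ _ hg.1] at ha
    exact hg.2 a (List.mem_of_mem_head? ha)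

lemma pvJoin_last_ne (ws : List (List Char)) (hws : ∀ w ∈ ws, pvGood w) (hne : ws ≠ [])
    (a : Char) (ha : (pvJoin ws).getLast? = some a) : a ≠ '_' := by
  rcases List.eq_nil_or_concat ws with h | ⟨ws', w, hcat⟩
  · exact absurd h hne
  · rw [List.concat_eq_append] at hcat
    subst hcat
    have hg := hws w (by simp)
    rw [pvJoin_getLast? _ _ hg.1] at ha
    exact hg.2 a (List.mem_of_getLast? ha)

-- a lowered alphanumeric character lands in 'a'..'z' or '0'..'9'
lemma pvLower_range (c : Char) (h : PySem.Chars.isalnum c = true) :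
    (97 ≤ (PySem.Chars.lowerChar c).toNat ∧ (PySem.Chars.lowerChar c).toNat ≤ 122) ∨
    (48 ≤ (PySem.Chars.lowerChar c).toNat ∧ (PySem.Chars.lowerChar c).toNat ≤ 57) := by
  have hb : (65 ≤ c.toNat ∧ c.toNat ≤ 90) ∨ (97 ≤ c.toNat ∧ c.toNat ≤ 122) ∨
      (48 ≤ c.toNat ∧ c.toNat ≤ 57) := by
    simp only [PySem.Chars.isalnum, PySem.Chars.isalpha, PySem.Chars.isdigit,
      PySem.Chars.isupper, PySem.Chars.islower, Bool.or_eq_true, Bool.and_eq_true,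
      decide_eq_true_eq, Char.le_def, UInt32.le_iff_toNat_le, Char.toNat_val] at h
    simpa [show ('A' : Char).toNat = 65 from rfl, show ('Z' : Char).toNat = 90 from rfl,
      show ('a' : Char).toNat = 97 from rfl, show ('z' : Char).toNat = 122 from rfl,
      show ('0' : Char).toNat = 48 from rfl, show ('9' : Char).toNat = 57 from rfl,
      or_assoc] using h
  unfold PySem.Chars.lowerChar PySem.Chars.isupper
  rcases hb with ⟨h1, h2⟩ | ⟨h1, h2⟩ | ⟨h1, h2⟩
  · rw [if_pos (by
        simp only [Bool.and_eq_true, decide_eq_true_eq, Char.le_def,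
          UInt32.le_iff_toNat_le, Char.toNat_val]
        exact ⟨h1, h2⟩)]
    have hv : Nat.isValidChar (c.toNat + 32) := Or.inl (by omega)
    rw [show (Char.ofNat (c.toNat + 32)).toNat = c.toNat + 32 from by simp [Char.ofNat, hv]]
    omega
  · rw [if_neg (by
        simp only [Bool.and_eq_true, decide_eq_true_eq, Char.le_def,
          UInt32.le_iff_toNat_le, Char.toNat_val]
        rintro ⟨hx, hy⟩
        have : ('A' : Char).toNat = 65 := rfl
        have : ('Z' : Char).toNat = 90 := rfl
        omega)]
    omega
  · rw [if_neg (by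
        simp only [Bool.and_eq_true, decide_eq_true_eq, Char.le_def,
          UInt32.le_iff_toNat_le, Char.toNat_val]
        rintro ⟨hx, hy⟩
        have : ('A' : Char).toNat = 65 := rfl
        have : ('Z' : Char).toNat = 90 := rfl
        omega)]
    omega

-- lowered alphanumeric characters are never an underscore
lemma pvLower_ne_underscore (c : Char) (h : PySem.Chars.isalnum c = true) :
    PySem.Chars.lowerChar c ≠ '_' := by
  intro he
  have h95 : (PySem.Chars.lowerChar c).toNat = 95 := by rw [he]; decide
  rcases pvLower_range c h with ⟨h1, h2⟩ | ⟨h1, h2⟩ <;> omega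

-- lowered alphanumeric characters are never whitespace
lemma pvLower_not_space (c : Char) (h : PySem.Chars.isalnum c = true) :
    PySem.Chars.isspace (PySem.Chars.lowerChar c) = false := by
  have hr := pvLower_range c h
  simp only [PySem.Chars.isspace, Bool.or_eq_false_iff, Bool.and_eq_false_iff,
    decide_eq_false_iff_not]
  rcases hr with ⟨h1, h2⟩ | ⟨h1, h2⟩ <;> omega

-- PROOF-SIDE intermediate machine: the (completed words, current run) automaton that
-- both A's accumulator and the split() pipeline are related to.
def pvBStep (st : List (List Char) × List Char) (c : Char) : List (List Char) × List Char :=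
  if PySem.Chars.isalnum c then (st.1, st.2 ++ [PySem.Chars.lowerChar c])
  else if st.2 ≠ [] then (st.1 ++ [st.2], []) else st

-- the invariant tying A's accumulator to the (words, buffer) state
def pvInv (st : List (List Char) × List Char) (acc : List Char) : Prop :=
  (∀ w ∈ st.1, pvGood w) ∧ (∀ c ∈ st.2, c ≠ '_') ∧
  (if st.2 = [] then
     (if st.1 = [] then acc = [] else acc = pvJoin st.1 ++ ['_'])
   else acc = pvJoin (st.1 ++ [st.2]))

lemma pvInv_getLast_ne (ws : List (List Char)) (buf : List Char) (hb : buf ≠ [])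
    (hgood : ∀ c ∈ buf, c ≠ '_') :
    (pvJoin (ws ++ [buf])).getLast? ≠ some '_' := by
  rw [pvJoin_getLast? _ _ hb]
  cases hl : buf.getLast? with
  | none => simp
  | some a =>
    have ha : a ∈ buf := List.mem_of_getLast? hl
    intro hcontra
    exact hgood a ha (by simpa using hcontra)

lemma pvLoop_inv (cs : List Char) (ws : List (List Char)) (buf acc : List Char)
    (h : pvInv (ws, buf) acc) :
    pvInv (cs.foldl pvBStep (ws, buf)) (cs.foldl pvAStep acc) := by
  induction cs generalizing ws buf acc with
  | nil => exact h
  | cons c cs ih =>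
    obtain ⟨hws, hbuf, hrel⟩ := h
    dsimp only at hws hbuf hrel
    simp only [List.foldl_cons]
    by_cases hc : PySem.Chars.isalnum c = true
    · -- alphanumeric: both append the lowered char
      have hd := pvLower_ne_underscore c hc
      rw [show pvBStep (ws, buf) c = (ws, buf ++ [PySem.Chars.lowerChar c]) from by
            simp [pvBStep, hc]]
      rw [show pvAStep acc c = acc ++ [PySem.Chars.lowerChar c] from by simp [pvAStep, hc]]
      apply ih
      unfold pvInv
      dsimp only
      refine ⟨hws, ?_, ?_⟩
      · intro x hx
        rcases List.mem_append.1 hx with hx | hx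
        · exact hbuf x hx
        · simp only [List.mem_singleton] at hx; subst hx; exact hd
      · rw [if_neg (by simp)]
        by_cases hb : buf = []
        · subst hb
          rw [if_pos rfl] at hrel
          by_cases hw : ws = []
          · rw [if_pos hw] at hrel; subst hw; simp [hrel, pvJoin]
          · rw [if_neg hw] at hrel
            rw [hrel, pvJoin_concat _ _ hw]
            simp
        · rw [if_neg hb] at hrel
          rw [hrel]
          cases ws with
          | nil => simp [pvJoin]
          | cons x xs =>
            rw [pvJoin_concat _ _ (by simp), pvJoin_concat _ _ (by simp)]
            simp
    · -- separator character
      by_cases hb : buf = []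
      · subst hb
        rw [show pvBStep (ws, []) c = (ws, ([] : List Char)) from by
              simp [pvBStep, hc]]
        rw [if_pos rfl] at hrel
        have hcond : ¬((acc ≠ []) ∧ acc.getLast? ≠ some '_') := by
          by_cases hw : ws = []
          · rw [if_pos hw] at hrel
            rintro ⟨h1, -⟩
            exact h1 hrel
          · rw [if_neg hw] at hrel
            rintro ⟨-, h2⟩
            exact h2 (by rw [hrel]; exact List.getLast?_append_of_ne_nil _ (by simp))
        rw [show pvAStep acc c = acc from by
              simp only [pvAStep]
              rw [if_neg hc, if_neg hcond]]
        exact ih _ _ _ ⟨hws, hbuf, hrel⟩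
      · rw [show pvBStep (ws, buf) c = (ws ++ [buf], ([] : List Char)) from by
              simp [pvBStep, hc, hb]]
        rw [if_neg hb] at hrel
        rw [show pvAStep acc c = acc ++ ['_'] from by
              simp only [pvAStep]
              rw [if_neg hc, if_pos ⟨by rw [hrel]; exact pvJoin_ne_nil _ _ hb,
                                     by rw [hrel]; exact pvInv_getLast_ne ws buf hb hbuf⟩]]
        apply ih
        unfold pvInv
        dsimp only
        refine ⟨?_, by simp, ?_⟩
        · intro w hw
          rcases List.mem_append.1 hw with hw' | hw'
          · exact hws w hw'
          · simp only [List.mem_singleton] at hw'; subst hw'; exact ⟨hb, hbuf⟩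
        · rw [if_pos rfl, if_neg (by simp), hrel]

-- stripping underscores is the identity on a string with none at either end
lemma pvStrip_eq_self (s : List Char)
    (h1 : ∀ a, s.head? = some a → a ≠ '_') (h2 : ∀ a, s.getLast? = some a → a ≠ '_') :
    PySem.Chars.stripChars s ['_'] = s := by
  simp only [PySem.Chars.stripChars]
  have hd1 : List.dropWhile (fun c => [('_' : Char)].contains c) s = s := by
    cases s with
    | nil => rfl
    | cons a l =>
      rw [List.dropWhile_cons_of_neg]
      simpa using h1 a rfl
  rw [hd1]
  have hd2 : List.dropWhile (fun c => [('_' : Char)].contains c) s.reverse = s.reverse := by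
    cases hs : s.reverse with
    | nil => rfl
    | cons a l =>
      rw [List.dropWhile_cons_of_neg]
      have : s.getLast? = some a := by rw [← List.head?_reverse, hs]; rfl
      simpa using h2 a this
  rw [hd2, List.reverse_reverse]

-- stripping underscores removes exactly the one trailing separator
lemma pvStrip_drop_last (s : List Char) (hne : s ≠ [])
    (h1 : ∀ a, s.head? = some a → a ≠ '_') (h2 : ∀ a, s.getLast? = some a → a ≠ '_') :
    PySem.Chars.stripChars (s ++ ['_']) ['_'] = s := by
  simp only [PySem.Chars.stripChars]
  have hd1 : List.dropWhile (fun c => [('_' : Char)].contains c) (s ++ ['_']) = s ++ ['_'] := by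
    cases s with
    | nil => exact absurd rfl hne
    | cons a l =>
      rw [List.cons_append, List.dropWhile_cons_of_neg]
      simpa using h1 a rfl
  rw [hd1, List.reverse_append]
  simp only [List.reverse_singleton, List.singleton_append]
  rw [List.dropWhile_cons_of_pos (by simp)]
  have hd2 : List.dropWhile (fun c => [('_' : Char)].contains c) s.reverse = s.reverse := by
    cases hs : s.reverse with
    | nil => rfl
    | cons a l =>
      rw [List.dropWhile_cons_of_neg]
      have : s.getLast? = some a := by rw [← List.head?_reverse, hs]; rfl
      simpa using h2 a this
  rw [hd2, List.reverse_reverse]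

-- A's post-loop computation agrees with the flushed word list of the automaton
lemma pvFinal (ws : List (List Char)) (buf acc : List Char) (h : pvInv (ws, buf) acc) :
    (if PySem.Chars.stripChars acc ['_'] = [] then "header".toList
     else PySem.Chars.stripChars acc ['_'])
    = (if PySem.Chars.join ['_'] (if buf ≠ [] then ws ++ [buf] else ws) = [] then "header".toList
       else PySem.Chars.join ['_'] (if buf ≠ [] then ws ++ [buf] else ws)) := by
  obtain ⟨hws, hbuf, hrel⟩ := h
  dsimp only at hws hbuf hrel
  rw [pvJoin_eq_join]
  by_cases hb : buf = []
  · subst hb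
    rw [if_pos rfl] at hrel
    rw [show (if ([] : List Char) ≠ [] then ws ++ [([] : List Char)] else ws) = ws from
          if_neg (fun hx => hx rfl)]
    by_cases hw : ws = []
    · rw [if_pos hw] at hrel
      subst hw
      simp [hrel, PySem.Chars.stripChars, pvJoin]
    · rw [if_neg hw] at hrel
      have hne : pvJoin ws ≠ [] := by
        rcases List.eq_nil_or_concat ws with h | ⟨ws', w, hcat⟩
        · exact absurd h hw
        · rw [List.concat_eq_append] at hcat
          subst hcat
          exact pvJoin_ne_nil _ _ (hws w (by simp)).1
      rw [hrel, pvStrip_drop_last _ hne (pvJoin_head_ne _ hws hw) (pvJoin_last_ne _ hws hw)]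
  · rw [if_neg hb] at hrel
    rw [if_pos hb]
    have hgood : ∀ w ∈ ws ++ [buf], pvGood w := by
      intro w hw
      rcases List.mem_append.1 hw with hw' | hw'
      · exact hws w hw'
      · simp only [List.mem_singleton] at hw'; subst hw'; exact ⟨hb, hbuf⟩
    have hne : pvJoin (ws ++ [buf]) ≠ [] := pvJoin_ne_nil _ _ hb
    rw [hrel, pvStrip_eq_self _ (pvJoin_head_ne _ hgood (by simp)) (pvJoin_last_ne _ hgood (by simp))]

-- recursive form of str.split() carrying the current (un-reversed) word
def pvSplitFrom (buf : List Char) : List Char → List (List Char)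
  | [] => if buf = [] then [] else [buf]
  | c :: cs =>
      if PySem.Chars.isspace c then (if buf = [] then [] else [buf]) ++ pvSplitFrom [] cs
      else pvSplitFrom (buf ++ [c]) cs

lemma pvSplit_go_eq (cs cur acc) :
    PySem.Chars.split₀.go cs cur acc = acc.reverse ++ pvSplitFrom cur.reverse cs := by
  induction cs generalizing cur acc with
  | nil =>
    by_cases hc : cur = []
    · subst hc; simp [PySem.Chars.split₀.go, pvSplitFrom]
    · simp [PySem.Chars.split₀.go, pvSplitFrom, hc, List.isEmpty_iff]
  | cons c cs ih =>
    by_cases hs : PySem.Chars.isspace c = true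
    · by_cases hc : cur = []
      · subst hc; simp [PySem.Chars.split₀.go, pvSplitFrom, hs, ih]
      · simp [PySem.Chars.split₀.go, pvSplitFrom, hs, hc, ih, List.isEmpty_iff]
    · simp [PySem.Chars.split₀.go, pvSplitFrom, hs, ih]

lemma pvSplit₀_eq (l : List Char) : PySem.Chars.split₀ l = pvSplitFrom [] l := by
  simpa using pvSplit_go_eq l [] []

-- the per-char mapping of B's pipeline, fused with lowercasing
def pvG (c : Char) : Char := if PySem.Chars.isalnum c then PySem.Chars.lowerChar c else ' '

lemma pvLower_mask (cs : List Char) :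
    PySem.Chars.lower (cs.map (fun c => if PySem.Chars.isalnum c then c else ' '))
      = cs.map pvG := by
  simp only [PySem.Chars.lower, List.map_map]
  refine List.map_congr_left (fun c _ => ?_)
  simp only [Function.comp]
  by_cases hc : PySem.Chars.isalnum c = true
  · simp [hc, pvG]
  · simp [hc, pvG]
    decide

-- the split() of the masked-lowered string is the flushed word list of the automaton
lemma pvSplit_eq_flush (cs : List Char) (ws : List (List Char)) (buf : List Char) :
    (if (cs.foldl pvBStep (ws, buf)).2 ≠ []
       then (cs.foldl pvBStep (ws, buf)).1 ++ [(cs.foldl pvBStep (ws, buf)).2]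
       else (cs.foldl pvBStep (ws, buf)).1)
    = ws ++ pvSplitFrom buf (cs.map pvG) := by
  induction cs generalizing ws buf with
  | nil =>
    simp only [List.foldl_nil, List.map_nil, pvSplitFrom]
    by_cases hb : buf = []
    · subst hb; simp
    · rw [if_pos hb, if_neg hb]
  | cons c cs ih =>
    simp only [List.foldl_cons, List.map_cons]
    by_cases hc : PySem.Chars.isalnum c = true
    · have hsp := pvLower_not_space c hc
      rw [show pvBStep (ws, buf) c = (ws, buf ++ [PySem.Chars.lowerChar c]) from by
            simp [pvBStep, hc],
          show pvG c = PySem.Chars.lowerChar c from by simp [pvG, hc],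
          show pvSplitFrom buf (PySem.Chars.lowerChar c :: List.map pvG cs)
              = pvSplitFrom (buf ++ [PySem.Chars.lowerChar c]) (List.map pvG cs) from by
            simp [pvSplitFrom, hsp],
          ih]
    · rw [show pvG c = ' ' from by simp [pvG, hc],
          show pvSplitFrom buf (' ' :: List.map pvG cs)
              = (if buf = [] then [] else [buf]) ++ pvSplitFrom [] (List.map pvG cs) from by
            simp [pvSplitFrom, show PySem.Chars.isspace ' ' = true from by decide]]
      by_cases hb : buf = []
      · subst hb
        rw [show pvBStep (ws, []) c = (ws, ([] : List Char)) from by simp [pvBStep, hc], ih]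
        simp
      · rw [show pvBStep (ws, buf) c = (ws ++ [buf], ([] : List Char)) from by
              simp [pvBStep, hc, hb], ih]
        simp [hb]

-- ===== VERDICT (by name: the statement is the Claim_ definition above) =====
theorem parameter_ref_id_py_spec : Claim_equal_parameter_ref_id_py := by
  intro s _
  unfold Spec_parameter_ref_id_py
  simp only [parameter_ref_id_py, parameter_ref_id_py_alt]
  rw [pvLower_mask, pvSplit₀_eq]
  have hsf := pvSplit_eq_flush s.toList [] []
  rw [List.nil_append] at hsf
  rw [← hsf]
  have hinv := pvLoop_inv s.toList [] [] [] (by unfold pvInv; simp)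
  rcases hst : s.toList.foldl pvBStep ([], []) with ⟨ws, buf⟩
  rw [hst] at hinv
  dsimp only
  rw [pvFinal ws buf _ hinv]
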